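-- pv_equiv track=rewrite | github.com/DigerryMan/Algorithms-and-Data-Structures-AGH-UST | BIT - zajęcia ponadprogramowe/bit#3 zachlany.py | peronczici
-- ===== SOURCE A (Python) =====
-- from queue import PriorityQueue
--
-- def peronczici(T, m):
--     PQ=PriorityQueue()
--     n=len(T)
--     for i in range(n):
--         PQ.put((T[i][0], 1))
--         PQ.put((T[i][1], -1))
--
--     cntr=0
--     while not PQ.empty():
--         priority, arrival = PQ.get()
--         cntr+=arrival
--         if cntr>m:
--             return False
--
--     return True
-- ===== SOURCE B (Python) =====
-- def _count_le(sorted_xs, v):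
--     # rightmost insertion point: number of elements <= v (hand-written bisect_right)
--     lo, hi = 0, len(sorted_xs)
--     while lo < hi:
--         mid = (lo + hi) // 2
--         if sorted_xs[mid] <= v:
--             lo = mid + 1
--         else:
--             hi = mid
--     return lo
--
-- def peronczici(T, m):
--     # For every start point s, the number of intervals covering the sweep position
--     # just after opening all intervals starting at s is (#starts <= s) - (#ends <= s);
--     # the overlap count ever exceeds m iff this quantity does at some start point.
--     starts = sorted(t[0] for t in T)
--     ends = sorted(t[1] for t in T)
--     return all(_count_le(starts, s) - _count_le(ends, s) <= m for s in starts)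
-- ===== Notes on version B (the rewrite author's own statement) =====
-- stated objective: alternative
-- what changed: Instead of sweeping +1/-1 events through a priority queue with a running counter, B sorts the start and the end coordinates separately and, for each start point s, computes the overlap there directly as (#starts <= s) - (#ends <= s) via a hand-written binary search, answering True iff no start point's overlap exceeds m.
import Mathlib
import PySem

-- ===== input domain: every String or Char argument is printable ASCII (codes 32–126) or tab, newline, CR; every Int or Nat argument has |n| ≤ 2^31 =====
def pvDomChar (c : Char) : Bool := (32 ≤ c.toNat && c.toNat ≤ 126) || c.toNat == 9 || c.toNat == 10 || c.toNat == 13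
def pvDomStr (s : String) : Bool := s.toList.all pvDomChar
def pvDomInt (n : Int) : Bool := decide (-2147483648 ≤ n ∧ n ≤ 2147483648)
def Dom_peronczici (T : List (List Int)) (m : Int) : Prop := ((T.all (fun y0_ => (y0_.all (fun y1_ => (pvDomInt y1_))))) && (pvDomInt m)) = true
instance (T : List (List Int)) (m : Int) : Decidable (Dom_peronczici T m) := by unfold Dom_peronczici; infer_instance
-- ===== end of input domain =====

-- B drops A's priority-queue event sweep entirely: it sorts starts and ends separately and checks,
-- per start point s, the overlap (#starts <= s) - (#ends <= s) by binary search (alternative algorithm, same cost).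

-- ===== PORT A =====
-- Python's tuple order on the (coordinate, ±1) events: (a1,a2) < (b1,b2).
def pqLt (a b : Int × Int) : Bool := decide (a.1 < b.1) || (a.1 == b.1 && decide (a.2 < b.2))

-- PriorityQueue modelled as a list kept sorted by the tuple order: PQ.put = ordered insert,
-- PQ.get = pop the head.  Exact: PriorityQueue.get returns the least tuple and this order is total,
-- so the sequence of gets is exactly the nondecreasing arrangement of the puts.
def pqPut (q : List (Int × Int)) (x : Int × Int) : List (Int × Int) :=
  PySem.List.insertBy pqLt x q

-- the 'while not PQ.empty()' loop: cntr += arrival; early return False when cntr > m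
def sweepA (q : List (Int × Int)) (m : Int) (cntr : Int) : Bool :=
  match q with
  | [] => true
  | (_, arrival) :: rest =>
    if cntr + arrival > m then false else sweepA rest m (cntr + arrival)

def peronczici (T : List (List Int)) (m : Int) : Bool :=
  -- for i in range(n): PQ.put((T[i][0],1)); PQ.put((T[i][1],-1))  — T[i] ranges over T in order
  match T.foldlM (fun q t => do
      let a ← PySem.List.pyGet? t 0
      let b ← PySem.List.pyGet? t 1
      pure (pqPut (pqPut q (a, 1)) (b, -1))) ([] : List (Int × Int)) with
  | none => false              -- IndexError in Python; excluded by Pre_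
  | some q => sweepA q m 0

-- ===== PORT B =====
-- Source B's hand-written bisect_right loop 'while lo < hi: …', transliterated step for step with an
-- explicit fuel bound (hi - lo decreases every iteration, so fuel = hi - lo iterations suffice);
-- mid = (lo + hi) // 2 is inlined, and the index mid is always in range, so getD is exact here
def countLeGo (xs : List Int) (v : Int) : Nat → Nat → Nat → Nat
  | 0, lo, _ => lo
  | fuel + 1, lo, hi =>
    if lo < hi then
      if xs.getD ((lo + hi) / 2) 0 ≤ v then countLeGo xs v fuel ((lo + hi) / 2 + 1) hi
      else countLeGo xs v fuel lo ((lo + hi) / 2)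
    else lo

def countLe (sorted_xs : List Int) (v : Int) : Nat := countLeGo sorted_xs v sorted_xs.length 0 sorted_xs.length

def peronczici_alt (T : List (List Int)) (m : Int) : Bool :=
  match T.mapM (fun t => PySem.List.pyGet? t 0), T.mapM (fun t => PySem.List.pyGet? t 1) with
  | some s0, some e0 =>
    let starts := PySem.List.sorted s0 (fun x => x) false
    let ends := PySem.List.sorted e0 (fun x => x) false
    starts.all (fun s => decide ((countLe starts s : Int) - (countLe ends s : Int) ≤ m))
  | _, _ => false             -- IndexError in Python; excluded by Pre_

-- ===== PRECONDITION & SPEC =====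
-- Pre_ excludes exactly the inputs where some interval has fewer than 2 entries: there Python A
-- (and B alike) raises IndexError on T[i][0] / T[i][1].
def Pre_peronczici (T : List (List Int)) (m : Int) : Prop := ∀ t ∈ T, 2 ≤ t.length
instance (T : List (List Int)) (m : Int) : Decidable (Pre_peronczici T m) := by unfold Pre_peronczici; infer_instance
def pvWitness_peronczici : List (List Int) × Int := ([[0, 2], [1, 3]], 1)

def Spec_peronczici (T : List (List Int)) (m : Int) (out : Bool) : Prop := out = peronczici_alt T m
instance (T : List (List Int)) (m : Int) (out : Bool) : Decidable (Spec_peronczici T m out) := by unfold Spec_peronczici; infer_instance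

-- ===== CLAIM (what is proved, stated in full; the proofs are below) =====
def Claim_equal_peronczici : Prop := ∀ (T : List (List Int)) (m : Int), Dom_peronczici T m → Pre_peronczici T m → Spec_peronczici T m (peronczici T m)

-- ===== LEMMAS AND PROOFS =====

-- abbreviations used only by the proofs
def ssOf (T : List (List Int)) : List Int := T.map (fun t => t.headD 0)
def esOf (T : List (List Int)) : List Int := T.map (fun t => (t.drop 1).headD 0)
def eventsOf (ss es : List Int) : List (Int × Int) :=
  ss.map (fun s => (s, (1 : Int))) ++ es.map (fun e => (e, (-1 : Int)))
def sSum (l : List (Int × Int)) : Int := (l.map Prod.snd).sum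
def cntLe (l : List Int) (s : Int) : Int := (l.countP (fun x => decide (x ≤ s)) : Int)

-- order facts about pqLt
theorem pqLt_asymm {a b : Int × Int} (h : pqLt a b = true) : pqLt b a = false := by
  obtain ⟨a1, a2⟩ := a; obtain ⟨b1, b2⟩ := b
  simp [pqLt] at *; omega

theorem pqLt_total {a b : Int × Int} (h : pqLt a b = false) (h' : pqLt b a = false) : a = b := by
  obtain ⟨a1, a2⟩ := a; obtain ⟨b1, b2⟩ := b
  simp [pqLt] at *; omega

theorem pqLt_not_trans {a b c : Int × Int} (h : pqLt b a = false) (h' : pqLt c b = false) :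
    pqLt c a = false := by
  obtain ⟨a1, a2⟩ := a; obtain ⟨b1, b2⟩ := b; obtain ⟨c1, c2⟩ := c
  simp [pqLt] at *; omega

theorem insertBy_perm {α : Type} (before : α → α → Bool) (x : α) (ys : List α) :
    (PySem.List.insertBy before x ys).Perm (x :: ys) := by
  induction ys with
  | nil => simp [PySem.List.insertBy]
  | cons y ys ih =>
    simp only [PySem.List.insertBy]
    split
    · exact List.Perm.refl _
    · exact (ih.cons y).trans (List.Perm.swap x y ys)

theorem pairwise_insertBy {x : Int × Int} {ys : List (Int × Int)}
    (h : ys.Pairwise (fun a b => pqLt b a = false)) :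
    (PySem.List.insertBy pqLt x ys).Pairwise (fun a b => pqLt b a = false) := by
  induction ys with
  | nil => simp [PySem.List.insertBy]
  | cons y ys ih =>
    simp only [PySem.List.insertBy]
    rcases List.pairwise_cons.mp h with ⟨hy, hys⟩
    split
    · rename_i hxy
      refine List.pairwise_cons.mpr ⟨?_, h⟩
      intro z hz
      rcases List.mem_cons.mp hz with rfl | hz
      · exact pqLt_asymm hxy
      · exact pqLt_not_trans (pqLt_asymm hxy) (hy z hz)
    · rename_i hxy
      refine List.pairwise_cons.mpr ⟨?_, ih hys⟩
      intro z hz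
      rcases (PySem.List.mem_insertBy pqLt x z ys).mp hz with rfl | hz
      · simpa using hxy
      · exact hy z hz

-- insertion-sorting a whole list
def sortIns (l : List (Int × Int)) : List (Int × Int) :=
  l.foldl (fun acc x => PySem.List.insertBy pqLt x acc) []

theorem foldl_insertBy_perm (l acc : List (Int × Int)) :
    (l.foldl (fun acc x => PySem.List.insertBy pqLt x acc) acc).Perm (acc ++ l) := by
  induction l generalizing acc with
  | nil => simp
  | cons x l ih =>
    have h1 := ih (PySem.List.insertBy pqLt x acc)
    have h2 : (PySem.List.insertBy pqLt x acc ++ l).Perm (acc ++ x :: l) :=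
      (((insertBy_perm pqLt x acc).append_right l).trans List.perm_middle.symm)
    exact h1.trans h2

theorem foldl_insertBy_pairwise (l acc : List (Int × Int))
    (h : acc.Pairwise (fun a b => pqLt b a = false)) :
    (l.foldl (fun acc x => PySem.List.insertBy pqLt x acc) acc).Pairwise
      (fun a b => pqLt b a = false) := by
  induction l generalizing acc with
  | nil => simpa
  | cons x l ih => exact ih _ (pairwise_insertBy h)

theorem sortIns_perm (l : List (Int × Int)) : (sortIns l).Perm l := by
  simpa using foldl_insertBy_perm l []

theorem sortIns_pairwise (l : List (Int × Int)) :
    (sortIns l).Pairwise (fun a b => pqLt b a = false) :=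
  foldl_insertBy_pairwise l [] (by simp)

theorem sortIns_congr {l₁ l₂ : List (Int × Int)} (h : l₁.Perm l₂) : sortIns l₁ = sortIns l₂ := by
  refine List.Perm.eq_of_pairwise ?_ (sortIns_pairwise l₁) (sortIns_pairwise l₂)
      (((sortIns_perm l₁).trans h).trans (sortIns_perm l₂).symm)
  intro a b _ _ h1 h2
  exact pqLt_total h2 h1

-- under Pre_, A's queue-building loop succeeds and builds sortIns of its event stream
theorem buildA_eq (T : List (List Int)) (h : ∀ t ∈ T, 2 ≤ t.length) (acc : List (Int × Int)) :
    T.foldlM (fun q t => do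
        let a ← PySem.List.pyGet? t 0
        let b ← PySem.List.pyGet? t 1
        pure (pqPut (pqPut q (a, 1)) (b, -1))) acc
      = some ((T.flatMap (fun t => [(t.headD 0, (1 : Int)), ((t.drop 1).headD 0, (-1 : Int))])).foldl
          (fun acc x => PySem.List.insertBy pqLt x acc) acc) := by
  induction T generalizing acc with
  | nil => simp [List.foldlM]
  | cons t T ih =>
    obtain ⟨a, b, r, rfl⟩ : ∃ a b r, t = a :: b :: r := by
      have := h t (by simp)
      match t with
      | a :: b :: r => exact ⟨a, b, r, rfl⟩
    have h0 : PySem.List.pyGet? (a :: b :: r) (0 : Int) = some a := by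
      simpa using PySem.List.pyGet?_natCast (a :: b :: r) 0
    have h1 : PySem.List.pyGet? (a :: b :: r) (1 : Int) = some b := by
      simpa using PySem.List.pyGet?_natCast (a :: b :: r) 1
    simp only [List.foldlM, List.flatMap_cons, List.foldl_append, List.foldl_cons, h0, h1,
      Option.bind_eq_bind, Option.bind_some, List.headD, List.drop, pqPut]
    exact ih (fun t ht => h t (by simp [ht])) _

-- under Pre_, B's generator expressions succeed
theorem mapM_get0_eq (T : List (List Int)) (h : ∀ t ∈ T, 2 ≤ t.length) :
    T.mapM (fun t => PySem.List.pyGet? t 0) = some (ssOf T) := by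
  induction T with
  | nil => rfl
  | cons t T ih =>
    obtain ⟨a, b, r, rfl⟩ : ∃ a b r, t = a :: b :: r := by
      have := h t (by simp)
      match t with
      | a :: b :: r => exact ⟨a, b, r, rfl⟩
    have hg : PySem.List.pyGet? (a :: b :: r) (0 : Int) = some a := by
      simpa using PySem.List.pyGet?_natCast (a :: b :: r) 0
    rw [List.mapM_cons, hg, ih (fun t ht => h t (by simp [ht]))]
    rfl

theorem mapM_get1_eq (T : List (List Int)) (h : ∀ t ∈ T, 2 ≤ t.length) :
    T.mapM (fun t => PySem.List.pyGet? t 1) = some (esOf T) := by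
  induction T with
  | nil => rfl
  | cons t T ih =>
    obtain ⟨a, b, r, rfl⟩ : ∃ a b r, t = a :: b :: r := by
      have := h t (by simp)
      match t with
      | a :: b :: r => exact ⟨a, b, r, rfl⟩
    have hg : PySem.List.pyGet? (a :: b :: r) (1 : Int) = some b := by
      simpa using PySem.List.pyGet?_natCast (a :: b :: r) 1
    rw [List.mapM_cons, hg, ih (fun t ht => h t (by simp [ht]))]
    rfl

-- A's interleaved event stream is a permutation of starts-events ++ ends-events
theorem stream_perm (T : List (List Int)) :
    (T.flatMap (fun t => [(t.headD 0, (1 : Int)), ((t.drop 1).headD 0, (-1 : Int))])).Perm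
      (eventsOf (ssOf T) (esOf T)) := by
  induction T with
  | nil => simp [eventsOf, ssOf, esOf]
  | cons t T ih =>
    simp only [List.flatMap_cons, eventsOf, ssOf, esOf, List.map_cons, List.cons_append]
    refine List.Perm.cons _ ?_
    exact ((ih.cons _).trans List.perm_middle.symm)

-- A's early-exit sweep returns true iff every nonempty prefix keeps the counter ≤ m
theorem sweep_iff (q : List (Int × Int)) (m c : Int) :
    sweepA q m c = true ↔ ∀ p, p <+: q → p ≠ [] → c + sSum p ≤ m := by
  induction q generalizing c with
  | nil =>
    simp only [sweepA, true_iff]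
    intro p hp hne
    exact absurd (List.prefix_nil.mp hp) hne
  | cons e q ih =>
    obtain ⟨x, d⟩ := e
    simp only [sweepA]
    by_cases hgt : c + d > m
    · rw [if_pos hgt]
      simp only [Bool.false_eq_true, false_iff]
      intro hall
      have := hall [(x, d)] ⟨q, rfl⟩ (by simp)
      simp [sSum] at this
      omega
    · rw [if_neg hgt]
      rw [ih]
      constructor
      · intro h p hp hne
        match p, hp with
        | [], _ => exact absurd rfl hne
        | (y :: p'), hp =>
          obtain ⟨r, hr⟩ := hp
          injection hr with hy hr'
          subst hy
          cases p' with
          | nil => simpa [sSum] using le_of_not_gt hgt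
          | cons z p'' =>
            have := h (z :: p'') ⟨r, hr'⟩ (by simp)
            simp only [sSum, List.map_cons, List.sum_cons] at *
            omega
      · intro h p hp hne
        have := h ((x, d) :: p) (List.cons_prefix_cons.mpr ⟨rfl, hp⟩) (by simp)
        simp only [sSum, List.map_cons, List.sum_cons] at *
        omega

-- counting split at an index
theorem count_split (xs : List Int) (P : Int → Bool) (k : Nat) (hk : k ≤ xs.length)
    (h1 : ∀ i (h : i < xs.length), i < k → P xs[i] = true)
    (h2 : ∀ i (h : i < xs.length), k ≤ i → P xs[i] = false) :
    xs.countP P = k := by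
  induction xs generalizing k with
  | nil =>
    have : k = 0 := by simpa using hk
    simp [this]
  | cons x xs ih =>
    cases k with
    | zero =>
      rw [List.countP_eq_zero.mpr]
      intro a ha
      obtain ⟨i, hi, rfl⟩ := List.mem_iff_getElem.mp ha
      simpa using h2 i hi (Nat.zero_le i)
    | succ k =>
      have hx : P x = true := by simpa using h1 0 (by simp) (Nat.succ_pos k)
      have hxs : xs.countP P = k := by
        refine ih k (by simpa using hk) ?_ ?_
        · intro i hi hik
          simpa using h1 (i + 1) (by simpa using hi) (by omega)
        · intro i hi hik
          simpa using h2 (i + 1) (by simpa using hi) (by omega)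
      simp [hx, hxs]

-- correctness of Source B's binary-search loop on a sorted list
theorem countLeGo_eq (xs : List Int) (v : Int) (hs : xs.Pairwise (· ≤ ·)) :
    ∀ fuel lo hi, hi - lo ≤ fuel → lo ≤ hi → hi ≤ xs.length →
    (∀ i (h : i < xs.length), i < lo → xs[i] ≤ v) →
    (∀ i (h : i < xs.length), hi ≤ i → ¬ xs[i] ≤ v) →
    countLeGo xs v fuel lo hi = xs.countP (fun x => decide (x ≤ v)) := by
  have hmono := List.pairwise_iff_getElem.mp hs
  intro fuel
  induction fuel with
  | zero =>
    intro lo hi hf hlh hhl h1 h2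
    have : lo = hi := by omega
    simp only [countLeGo]
    exact (count_split xs _ lo (by omega)
      (fun i h hik => by simpa using h1 i h hik)
      (fun i h hik => by simpa using h2 i h (by omega))).symm
  | succ fuel ih =>
    intro lo hi hf hlh hhl h1 h2
    simp only [countLeGo]
    by_cases hlt : lo < hi
    · rw [if_pos hlt]
      have hmidlt : (lo + hi) / 2 < xs.length := by omega
      have hgd : xs.getD ((lo + hi) / 2) 0 = xs[(lo + hi) / 2] :=
        List.getD_eq_getElem xs 0 hmidlt
      rw [hgd]
      by_cases hv : xs[(lo + hi) / 2] ≤ v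
      · rw [if_pos hv]
        refine ih ((lo + hi) / 2 + 1) hi (by omega) (by omega) hhl ?_ h2
        intro i h hik
        rcases Nat.lt_or_ge i lo with hc | hc
        · exact h1 i h hc
        · rcases Nat.lt_or_ge i ((lo + hi) / 2) with hc2 | hc2
          · exact le_trans (hmono i ((lo + hi) / 2) h hmidlt hc2) hv
          · have : i = (lo + hi) / 2 := by omega
            subst this; exact hv
      · rw [if_neg hv]
        refine ih lo ((lo + hi) / 2) (by omega) (by omega) (by omega) h1 ?_
        intro i h hik
        intro hle
        rcases Nat.lt_or_ge ((lo + hi) / 2) i with hc | hc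
        · exact hv (le_trans (hmono ((lo + hi) / 2) i hmidlt h hc) hle)
        · have : i = (lo + hi) / 2 := by omega
          subst this; exact hv hle
    · rw [if_neg hlt]
      have : lo = hi := by omega
      subst this
      exact (count_split xs _ lo hhl
        (fun i h hik => by simpa using h1 i h hik)
        (fun i h hik => by simpa using h2 i h hik)).symm

theorem countLe_eq (l : List Int) (v : Int) :
    (countLe (PySem.List.sorted l (fun x => x) false) v : Int) = cntLe l v := by
  have hs : (PySem.List.sorted l (fun x => x) false).Pairwise (· ≤ ·) := by
    simpa using PySem.List.sorted_pairwise l (fun x => x)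
  unfold countLe cntLe
  rw [countLeGo_eq _ v hs ((PySem.List.sorted l (fun x => x) false).length) 0 _ (by omega)
      (Nat.zero_le _) (le_refl _) (fun i h hik => by omega) (fun i h hik => by omega)]
  rw [(PySem.List.sorted_perm l (fun x => x) false).countP_eq]

-- the overlap at s, read off the event multiset
theorem sSum_filter_events (ss es : List Int) (s : Int) :
    sSum ((eventsOf ss es).filter (fun e => decide (e.1 ≤ s))) = cntLe ss s - cntLe es s := by
  unfold eventsOf sSum cntLe
  rw [List.filter_append, List.map_append, List.sum_append, List.filter_map, List.filter_map]
  simp only [List.map_map, Function.comp_def]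
  rw [PySem.List.sum_map_const_int, PySem.List.sum_map_const_int]
  rw [← List.countP_eq_length_filter, ← List.countP_eq_length_filter]
  ring

-- a coordinate-downward-closed filter of the sorted event list is one of its prefixes
theorem filter_prefix_of_sorted (q : List (Int × Int)) (s : Int)
    (hq : q.Pairwise (fun a b => pqLt b a = false)) :
    q.filter (fun e => decide (e.1 ≤ s)) <+: q := by
  induction q with
  | nil => simp
  | cons e q ih =>
    rcases List.pairwise_cons.mp hq with ⟨he, hq'⟩
    by_cases hs : e.1 ≤ s
    · rw [List.filter_cons_of_pos (by simpa using hs)]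
      exact List.cons_prefix_cons.mpr ⟨rfl, ih hq'⟩
    · rw [List.filter_cons_of_neg (by simpa using hs)]
      have : q.filter (fun e => decide (e.1 ≤ s)) = [] := by
        rw [List.filter_eq_nil_iff]
        intro b hb
        have := he b hb
        obtain ⟨e1, e2⟩ := e; obtain ⟨b1, b2⟩ := b
        simp only [pqLt] at this ⊢
        simp at this ⊢
        omega
      rw [this]
      exact List.nil_prefix

-- every event has arrival ±1, and +1 events carry a start coordinate
theorem snd_of_mem_events {ss es : List Int} {e : Int × Int} (h : e ∈ eventsOf ss es) :
    (e.2 = 1 ∧ e.1 ∈ ss) ∨ (e.2 = -1 ∧ e.1 ∈ es) := by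
  unfold eventsOf at h
  rcases List.mem_append.mp h with h | h <;> obtain ⟨x, hx, rfl⟩ := List.mem_map.mp h
  · exact Or.inl ⟨rfl, hx⟩
  · exact Or.inr ⟨rfl, hx⟩

-- the heart: on the sorted event list, "counter never exceeds m" ⟺ "overlap at every start ≤ m"
theorem main_iff (ss es : List Int) (q : List (Int × Int)) (m : Int)
    (hperm : q.Perm (eventsOf ss es)) (hpair : q.Pairwise (fun a b => pqLt b a = false))
    (hlen : ss.length = es.length) :
    (sweepA q m 0 = true) ↔ ∀ s ∈ ss, cntLe ss s - cntLe es s ≤ m := by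
  have hfilt : ∀ s : Int, sSum (q.filter (fun e => decide (e.1 ≤ s))) = cntLe ss s - cntLe es s := by
    intro s
    rw [← sSum_filter_events ss es s]
    unfold sSum
    exact ((hperm.filter _).map Prod.snd).sum_eq
  rw [sweep_iff]
  constructor
  · -- sweep ok ⇒ overlap at every start ≤ m
    intro h s hsmem
    have hmem : (s, (1 : Int)) ∈ q :=
      hperm.mem_iff.mpr (List.mem_append.mpr (Or.inl (List.mem_map.mpr ⟨s, hsmem, rfl⟩)))
    have hne : q.filter (fun e => decide (e.1 ≤ s)) ≠ [] := by
      intro hnil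
      have : (s, (1 : Int)) ∈ q.filter (fun e => decide (e.1 ≤ s)) :=
        List.mem_filter.mpr ⟨hmem, by simp⟩
      rw [hnil] at this
      exact absurd this (List.not_mem_nil)
    have := h _ (filter_prefix_of_sorted q s hpair) hne
    rw [hfilt s] at this
    omega
  · -- overlap at every start ≤ m ⇒ every nonempty prefix sum ≤ m
    intro h p hp hne
    -- first: m ≥ 0, because the largest start has nonnegative overlap
    have hssne : ss ≠ [] := by
      intro hnil
      subst hnil
      have hes : es.length = 0 := by simpa using hlen.symm
      have : es = [] := List.eq_nil_of_length_eq_zero hes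
      subst this
      have : q = [] := List.eq_nil_of_length_eq_zero (by simpa [eventsOf] using hperm.length_eq)
      subst this
      exact hne (List.prefix_nil.mp hp)
    have hsslen : 0 < ss.length := List.length_pos_of_ne_nil hssne
    have hm0 : 0 ≤ m := by
      set s0 := ss.maximum_of_length_pos hsslen with hs0
      have hs0mem : s0 ∈ ss := List.maximum_of_length_pos_mem hsslen
      have hs0max : ∀ b ∈ ss, b ≤ s0 :=
        fun b hb => List.le_maximum_of_length_pos_of_mem hb hsslen
      have hcs : cntLe ss s0 = (ss.length : Int) := by
        unfold cntLe
        rw [List.countP_eq_length.mpr (fun a ha => by simpa using hs0max a ha)]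
      have hce : cntLe es s0 ≤ (es.length : Int) := by
        unfold cntLe
        exact_mod_cast List.countP_le_length
      have := h s0 hs0mem
      omega
    -- strong induction over the prefix, peeled from the right
    clear hne
    induction p using List.reverseRecOn with
    | nil => simpa [sSum] using hm0
    | append_singleton p' e ihp =>
      have hp' : p' <+: q := ((p'.prefix_append [e]).trans hp)
      have hS' : sSum p' ≤ m := by simpa using ihp hp'
      rw [zero_add]
      have hSe : sSum (p' ++ [e]) = sSum p' + e.2 := by simp [sSum]
      have hemem : e ∈ q := hp.subset (by simp)
      rcases snd_of_mem_events (hperm.subset hemem) with ⟨h2, hx⟩ | ⟨h2, _⟩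
      · -- e = (x, 1): bound the prefix sum by the overlap at x
        obtain ⟨r, hr⟩ := hp
        -- every element of p' ++ [e] has coordinate ≤ e.1; later filtered elements add ≥ 0
        have hqsplit : q.filter (fun y => decide (y.1 ≤ e.1))
            = (p' ++ [e]) ++ r.filter (fun y => decide (y.1 ≤ e.1)) := by
          rw [← hr, List.filter_append]
          congr 1
          rw [List.filter_eq_self]
          intro a ha
          rcases List.mem_append.mp ha with ha' | ha'
          · -- a before e in the sorted q: a ≤lex e, so a.1 ≤ e.1
            have hpair' : ((p' ++ [e]) ++ r).Pairwise (fun a b => pqLt b a = false) := by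
              rwa [hr]
            have hpe : (p' ++ [e]).Pairwise (fun a b => pqLt b a = false) :=
              (List.pairwise_append.mp hpair').1
            have := (List.pairwise_append.mp hpe).2.2 a ha' e (by simp)
            obtain ⟨a1, a2⟩ := a; obtain ⟨e1, e2⟩ := e
            simp [pqLt] at this ⊢
            omega
          · simp at ha'
            subst ha'
            simp
        have hrpos : 0 ≤ sSum (r.filter (fun y => decide (y.1 ≤ e.1))) := by
          unfold sSum
          apply List.sum_nonneg
          intro z hz
          obtain ⟨b, hb, rfl⟩ := List.mem_map.mp hz
          rcases List.mem_filter.mp hb with ⟨hbr, hble⟩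
          -- b comes after e in sorted q: e ≤lex b, and b.1 ≤ e.1 forces b.2 ≥ 1
          have hpair' : ((p' ++ [e]) ++ r).Pairwise (fun a b => pqLt b a = false) := by
            rwa [hr]
          have := (List.pairwise_append.mp hpair').2.2 e (by simp) b hbr
          obtain ⟨e1, e2⟩ := e; obtain ⟨b1, b2⟩ := b
          simp [pqLt] at this hble ⊢
          simp at h2
          omega
        have hfq := hfilt e.1
        rw [hqsplit] at hfq
        have hxbound := h e.1 hx
        have hsplit : sSum (p' ++ [e]) + sSum (r.filter (fun y => decide (y.1 ≤ e.1)))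
            = cntLe ss e.1 - cntLe es e.1 := by
          rw [← hfq]; simp [sSum]; ring
        omega
      · -- e = (x, -1): the sum drops
        rw [hSe, h2]
        omega

-- turn B's 'all' into the per-start bound
theorem alt_all_iff (T : List (List Int)) (m : Int) :
    ((PySem.List.sorted (ssOf T) (fun x => x) false).all
        (fun s => decide ((countLe (PySem.List.sorted (ssOf T) (fun x => x) false) s : Int)
          - (countLe (PySem.List.sorted (esOf T) (fun x => x) false) s : Int) ≤ m)) = true)
      ↔ ∀ s ∈ ssOf T, cntLe (ssOf T) s - cntLe (esOf T) s ≤ m := by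
  rw [List.all_eq_true]
  constructor
  · intro h s hs
    have := h s ((PySem.List.mem_sorted _ _ _ _).mpr hs)
    rw [countLe_eq, countLe_eq] at this
    exact of_decide_eq_true this
  · intro h s hs
    rw [countLe_eq, countLe_eq]
    exact decide_eq_true (h s ((PySem.List.mem_sorted _ _ _ _).mp hs))

-- ===== VERDICT (by name: the statement is the Claim_ definition above) =====
theorem peronczici_spec : Claim_equal_peronczici := by
  intro T m _ hpre
  unfold Spec_peronczici peronczici peronczici_alt
  rw [buildA_eq T hpre [], mapM_get0_eq T hpre, mapM_get1_eq T hpre]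
  have hq : (T.flatMap (fun t => [(t.headD 0, (1 : Int)), ((t.drop 1).headD 0, (-1 : Int))])).foldl
      (fun acc x => PySem.List.insertBy pqLt x acc) []
      = sortIns (eventsOf (ssOf T) (esOf T)) := sortIns_congr (stream_perm T)
  rw [hq]
  have hlen : (ssOf T).length = (esOf T).length := by simp [ssOf, esOf]
  have hmain := main_iff (ssOf T) (esOf T) (sortIns (eventsOf (ssOf T) (esOf T))) m
    (sortIns_perm _) (sortIns_pairwise _) hlen
  have halt := alt_all_iff T m
  rw [Bool.eq_iff_iff, hmain, ← halt]
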